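-- pv_equiv track=rewrite | github.com/mahirlabibdihan/LLMSniffer | data/whodunit/train/0_EXUNB_1.py | solve
-- ===== SOURCE A (Python) =====
-- def solve(N):
--     if N % 2 == 0:
--         return "NO", []
--     else:
--         result = []
--         for i in range(N):
--             row = []
--             for j in range(N):
--                 if i == j:
--                     row.append(0)
--                 elif (i - j + N) % N <= N // 2:
--                     row.append(1)
--                 else:
--                     row.append(0)
--             result.append(row)
--         return "YES", result
-- ===== SOURCE B (Python) =====
-- def solve(N):
--     if N % 2 == 0:
--         return "NO", []
--     # first row of the circulant matrix; each later row is the previous one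
--     # rotated right by one, so the per-cell modular test is evaluated only once
--     result = []
--     row = [1 if j != 0 and (N - j) % N <= N // 2 else 0 for j in range(N)]
--     for _ in range(N):
--         result.append(row)
--         row = row[-1:] + row[:-1]
--     return "YES", result
-- ===== Notes on version B (the rewrite author's own statement) =====
-- stated objective: alternative
-- what changed: Instead of evaluating the modular half-circle comparison for every cell of the matrix, B computes only the first row with that test and derives each subsequent row by rotating the previous row one position to the right, exploiting the circulant structure.
import Mathlib
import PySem

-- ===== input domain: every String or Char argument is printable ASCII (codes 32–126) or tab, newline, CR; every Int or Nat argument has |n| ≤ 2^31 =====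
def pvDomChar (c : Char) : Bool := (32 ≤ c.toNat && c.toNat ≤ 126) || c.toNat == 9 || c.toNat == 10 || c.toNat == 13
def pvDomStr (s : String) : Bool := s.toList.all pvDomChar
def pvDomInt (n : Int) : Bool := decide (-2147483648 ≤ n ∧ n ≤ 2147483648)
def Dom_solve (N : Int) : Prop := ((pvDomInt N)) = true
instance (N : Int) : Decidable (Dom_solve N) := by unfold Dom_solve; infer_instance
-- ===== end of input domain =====

-- B builds only the first row with the modular test and derives each next row by a
-- right rotation of the previous one (circulant structure); objective: alternative/simpler.

-- ===== PORT A =====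
def solve (N : Int) : String × List (List Int) :=
  if PySem.Int.mod N 2 = 0 then ("NO", [])
  else
    let result := (PySem.List.pyRange 0 N 1).foldl (fun result i =>
      let row := (PySem.List.pyRange 0 N 1).foldl (fun row j =>
        if i = j then row ++ [(0 : Int)]
        else if PySem.Int.mod (i - j + N) N ≤ PySem.Int.floordiv N 2 then row ++ [1]
        else row ++ [0]) []
      result ++ [row]) []
    ("YES", result)

-- ===== PORT B =====
def solve_alt (N : Int) : String × List (List Int) :=
  if PySem.Int.mod N 2 = 0 then ("NO", [])
  else
    let row0 := (PySem.List.pyRange 0 N 1).map (fun j =>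
      if j ≠ 0 ∧ PySem.Int.mod (N - j) N ≤ PySem.Int.floordiv N 2 then (1 : Int) else 0)
    let p := (PySem.List.pyRange 0 N 1).foldl
      (fun (p : List (List Int) × List Int) _ =>
        (p.1 ++ [p.2],
         PySem.List.slice p.2 (some (-1)) none ++ PySem.List.slice p.2 none (some (-1))))
      (([] : List (List Int)), row0)
    ("YES", p.1)

-- ===== PRECONDITION & SPEC =====
def Spec_solve (N : Int) (out : String × List (List Int)) : Prop := out = solve_alt N
instance (N : Int) (out : String × List (List Int)) : Decidable (Spec_solve N out) := by unfold Spec_solve; infer_instance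

-- ===== CLAIM (what is proved, stated in full; the proofs are below) =====
def Claim_equal_solve : Prop := ∀ (N : Int), Dom_solve N → Spec_solve N (solve N)

-- ===== LEMMAS AND PROOFS =====

def cellG (N i : Int) (k : Nat) : Int :=
  if i = (k : Int) then 0
  else if PySem.Int.mod (i - (k : Int) + N) N ≤ PySem.Int.floordiv N 2 then 1 else 0

def rowG (N i : Int) : List Int := (List.range N.toNat).map (cellG N i)

def rotR (r : List Int) : List Int := r.drop (r.length - 1) ++ r.dropLast

theorem cellG_eq_mod (N i : Int) (k : Nat) (hN : 0 < N) (hi0 : 0 ≤ i) (hiN : i < N)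
    (hk : (k : Int) < N) :
    cellG N i k = (if (i - (k : Int)) % N = 0 then 0
      else if (i - (k : Int)) % N ≤ N / 2 then 1 else 0) := by
  unfold cellG
  rw [PySem.Int.mod_eq_emod_of_pos hN, PySem.Int.floordiv_eq_ediv_of_pos (show (0:Int) < 2 by norm_num)]
  have h1 : (i - (k : Int) + N) % N = (i - (k : Int)) % N := Int.add_emod_right _ _
  have h2 : (i = (k : Int)) ↔ ((i - (k : Int)) % N = 0) := by
    constructor
    · intro h; simp [h]
    · intro h
      have hd : N ∣ (i - (k : Int)) := Int.dvd_of_emod_eq_zero h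
      have := Int.eq_zero_of_abs_lt_dvd hd (by rw [abs_lt]; omega)
      omega
  rw [h1]
  by_cases h : i = (k : Int)
  · simp [h]
  · rw [if_neg h, if_neg (fun hc => h (h2.mpr hc))]

theorem rotR_rowG (N i : Int) (hN : 0 < N) (hi0 : 0 ≤ i) (hi : i + 1 < N) :
    rotR (rowG N i) = rowG N (i + 1) := by
  obtain ⟨m, hm⟩ : ∃ m : Nat, N.toNat = m + 1 := ⟨N.toNat - 1, by omega⟩
  have hmN : ((m : Int) + 1) = N := by omega
  unfold rotR rowG
  rw [hm]
  conv_lhs => rw [List.range_succ]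
  conv_rhs => rw [List.range_succ_eq_map]
  simp only [List.map_append, List.map_cons, List.map_nil, List.length_append,
    List.length_map, List.length_range, List.length_cons, List.length_nil]
  rw [show m + 1 + 0 - 1 = m from by omega,
      List.drop_append_of_le_length (by simp),
      List.dropLast_concat]
  rw [List.drop_of_length_le (by simp)]
  simp only [List.nil_append, List.map_map, List.singleton_append]
  rw [List.cons_eq_cons]
  refine ⟨?_, ?_⟩
  · have harg : (i - (m:Int)) % N = (i + 1 - ((0:Nat):Int)) % N := by
      rw [show i - (m:Int) = (i + 1) - N from by omega, Int.sub_emod_right]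
      norm_num
    exact (cellG_eq_mod N i m hN hi0 (by omega) (by omega)).trans
      (by rw [harg]; exact (cellG_eq_mod N (i+1) 0 hN (by omega) hi (by omega)).symm)
  · apply List.map_congr_left
    intro k hk
    have hk' : (k : Int) < (m : Int) := by exact_mod_cast List.mem_range.mp hk
    rw [Function.comp_apply]
    rw [cellG_eq_mod N (i+1) (k+1) hN (by omega) hi (by push_cast; omega),
        cellG_eq_mod N i k hN hi0 (by omega) (by omega)]
    have : (i + 1 - ((k:Nat)+1 : Nat)) % N = (i - (k:Int)) % N := by push_cast; ring_nf
    rw [this]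

theorem foldl_pair_rot (l : List Int) (acc : List (List Int)) (r : List Int)
    (rot : List Int → List Int) :
    l.foldl (fun p _ => (p.1 ++ [p.2], rot p.2)) (acc, r)
      = (acc ++ (List.range l.length).map (fun k => rot^[k] r), rot^[l.length] r) := by
  induction l generalizing acc r with
  | nil => simp
  | cons x l ih =>
    simp only [List.foldl_cons, ih, List.length_cons, List.range_succ_eq_map]
    simp [Function.iterate_succ_apply, List.map_map, Function.comp_def]

theorem iter_rotR (N : Int) (hN : 0 < N) (k : Nat) (hk : (k : Int) < N) :
    rotR^[k] (rowG N 0) = rowG N (k : Int) := by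
  induction k with
  | zero => simp
  | succ m ih =>
    rw [Function.iterate_succ_apply', ih (by push_cast at hk ⊢; omega)]
    rw [rotR_rowG N m hN (by positivity) (by push_cast at hk ⊢; omega)]
    push_cast
    ring_nf

theorem row_inner_eq (N i : Int) :
    (PySem.List.pyRange 0 N 1).foldl (fun row j =>
        if i = j then row ++ [(0 : Int)]
        else if PySem.Int.mod (i - j + N) N ≤ PySem.Int.floordiv N 2 then row ++ [1]
        else row ++ [0]) []
      = rowG N i := by
  have hstep : ∀ (row : List Int) (j : Int),
      (if i = j then row ++ [(0 : Int)]
       else if PySem.Int.mod (i - j + N) N ≤ PySem.Int.floordiv N 2 then row ++ [1]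
       else row ++ [0])
      = row ++ [if i = j then (0 : Int)
        else if PySem.Int.mod (i - j + N) N ≤ PySem.Int.floordiv N 2 then 1 else 0] := by
    intro row j; split_ifs <;> rfl
  simp only [hstep]
  rw [PySem.List.foldl_append_singleton_eq_map]
  rw [PySem.List.pyRange_one]
  unfold rowG cellG
  simp [List.map_map, Function.comp_def]

theorem row0_eq (N : Int) :
    (PySem.List.pyRange 0 N 1).map (fun j =>
      if j ≠ 0 ∧ PySem.Int.mod (N - j) N ≤ PySem.Int.floordiv N 2 then (1 : Int) else 0)
      = rowG N 0 := by
  rw [PySem.List.pyRange_one]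
  unfold rowG cellG
  simp only [List.map_map, Function.comp_def, zero_add, Int.sub_zero]
  apply List.map_congr_left
  intro k _
  rw [show (0 : Int) - (k : Int) + N = N - (k : Int) from by ring]
  by_cases h0 : ((k : Int)) = 0
  · simp [h0]
  · by_cases hm : PySem.Int.mod (N - (k : Int)) N ≤ PySem.Int.floordiv N 2
    · rw [if_pos ⟨h0, hm⟩, if_neg (fun h => h0 h.symm), if_pos hm]
    · rw [if_neg (fun hc => hm hc.2), if_neg (fun h => h0 h.symm), if_neg hm]

-- ===== VERDICT (by name: the statement is the Claim_ definition above) =====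
theorem solve_spec : Claim_equal_solve := by
  unfold Claim_equal_solve Spec_solve
  intro N _
  unfold solve solve_alt
  by_cases he : PySem.Int.mod N 2 = 0
  · rw [if_pos he, if_pos he]
  · rw [if_neg he, if_neg he]
    by_cases hN : 0 < N
    · have hrot : ∀ (p : List (List Int) × List Int),
          PySem.List.slice p.2 (some (-1)) none ++ PySem.List.slice p.2 none (some (-1))
            = rotR p.2 := by
        intro p
        rw [PySem.List.slice_from_neg_one, PySem.List.slice_to_neg_one]
        rfl
      simp only [hrot]
      have hB : (PySem.List.pyRange 0 N 1).foldl
          (fun (p : List (List Int) × List Int) _ => (p.1 ++ [p.2], rotR p.2))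
          (([] : List (List Int)), (PySem.List.pyRange 0 N 1).map (fun j =>
            if j ≠ 0 ∧ PySem.Int.mod (N - j) N ≤ PySem.Int.floordiv N 2 then (1 : Int) else 0))
          = ((List.range (PySem.List.pyRange 0 N 1).length).map (fun k => rotR^[k] (rowG N 0)),
             rotR^[(PySem.List.pyRange 0 N 1).length] (rowG N 0)) := by
        rw [row0_eq N, foldl_pair_rot]
        simp
      simp only [hB]
      congr 1
      have hlen : (PySem.List.pyRange 0 N 1).length = N.toNat := by
        rw [PySem.List.length_pyRange_one]; omega
      rw [hlen]
      have hA : ∀ (i : Int), (PySem.List.pyRange 0 N 1).foldl (fun row j =>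
          if i = j then row ++ [(0 : Int)]
          else if PySem.Int.mod (i - j + N) N ≤ PySem.Int.floordiv N 2 then row ++ [1]
          else row ++ [0]) [] = rowG N i := fun i => row_inner_eq N i
      simp only [hA]
      rw [PySem.List.foldl_append_singleton_eq_map, List.nil_append,
          PySem.List.pyRange_one]
      simp only [List.map_map, Function.comp_def, zero_add, Int.sub_zero]
      apply List.map_congr_left
      intro k hk
      rw [iter_rotR N hN k (by have := List.mem_range.mp hk; omega)]
    · rw [PySem.List.pyRange_one_eq_nil (by omega)]
      simp
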